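-- pv_equiv track=rewrite | github.com/RohanCB18/EL_project | backend/app/services/llm_service.py | clean_llm_response
-- ===== SOURCE A (Python) =====
-- def clean_llm_response(response: str) -> str:
--     """
--     Remove trailing notes/commentary and markdown formatting that LLM often adds.
--     """
--     # Remove markdown bold/italic formatting
--     response = response.replace('**', '')
--     response = response.replace('__', '')
--
--     # Common patterns LLMs add at the start (intro text to skip)
--     skip_start_patterns = [
--         "here are",
--         "here is",
--         "okay,",
--         "sure,",
--         "below are",
--         "i'll create",
--         "i will create",
--     ]
--
--     # Common patterns LLMs add at the end (notes to stop at)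
--     stop_patterns = [
--         "note that",
--         "note:",
--         "i have",
--         "i've used",
--         "please note",
--         "the above",
--         "these questions",
--         "based on the",
--         "let me know",
--         "hope this helps",
--         "this question assesses",
--         "this tests",
--     ]
--
--     lines = response.strip().split('\n')
--     clean_lines = []
--     started = False
--
--     for line in lines:
--         line_lower = line.lower().strip()
--
--         # Skip intro lines at the start
--         if not started:
--             if any(line_lower.startswith(pattern) for pattern in skip_start_patterns):
--                 continue
--             # Check if this line starts a question (number pattern)
--             if line_lower and (line_lower[0].isdigit() or line_lower.startswith('q')):
--                 started = True
--
--         # Stop if we hit a trailing note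
--         if started and any(line_lower.startswith(pattern) for pattern in stop_patterns):
--             break
--
--         if started or (line_lower and line_lower[0].isdigit()):
--             started = True
--             clean_lines.append(line)
--
--     return '\n'.join(clean_lines).strip()
-- ===== SOURCE B (Python) =====
-- STOP_PATTERNS = [
--     "note that", "note:", "i have", "i've used", "please note",
--     "the above", "these questions", "based on the", "let me know",
--     "hope this helps", "this question assesses", "this tests",
-- ]
--
--
-- def _starts_question(line):
--     n = line.lower().strip()
--     return bool(n) and (n[0].isdigit() or n.startswith('q'))
--
--
-- def clean_llm_response(response: str) -> str:
--     response = response.replace('**', '').replace('__', '')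
--     lines = response.strip().split('\n')
--     start = next((i for i, l in enumerate(lines) if _starts_question(l)), None)
--     if start is None:
--         return ''
--     kept = []
--     for line in lines[start:]:
--         n = line.lower().strip()
--         if any(n.startswith(p) for p in STOP_PATTERNS):
--             break
--         kept.append(line)
--     return '\n'.join(kept).strip()
-- ===== Notes on version B (the rewrite author's own statement) =====
-- stated objective: simpler
-- what changed: Replaces A's single stateful started-flag pass (with interleaved continue/break/append branches) by two explicit phases: find the index of the first question-starting line, then collect lines from there until a stop pattern; relies on the fact that a question line matches no skip or stop pattern.
import Mathlib
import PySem

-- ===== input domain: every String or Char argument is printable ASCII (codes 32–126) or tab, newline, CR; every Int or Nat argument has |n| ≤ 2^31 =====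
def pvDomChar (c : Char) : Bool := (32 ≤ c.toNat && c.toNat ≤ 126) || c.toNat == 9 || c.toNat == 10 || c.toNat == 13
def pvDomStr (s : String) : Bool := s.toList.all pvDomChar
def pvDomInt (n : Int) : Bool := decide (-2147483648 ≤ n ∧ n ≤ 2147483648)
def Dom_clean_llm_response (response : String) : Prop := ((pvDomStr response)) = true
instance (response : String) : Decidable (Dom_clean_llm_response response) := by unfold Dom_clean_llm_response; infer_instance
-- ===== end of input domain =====

-- B replaces A's single stateful `started`-flag pass by two phases — find the first
-- question line, then collect until a stop pattern — objective: simpler decomposition.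

-- shared constants / one-line helpers (identical literals in both Python versions)
def pvSkipPats : List String :=
  ["here are", "here is", "okay,", "sure,", "below are", "i'll create", "i will create"]
def pvStopPats : List String :=
  ["note that", "note:", "i have", "i've used", "please note", "the above",
   "these questions", "based on the", "let me know", "hope this helps",
   "this question assesses", "this tests"]
-- line.lower().strip()
def pvNorm (line : String) : String := PySem.Str.strip (PySem.Str.lower line)
-- Python short-circuit `s and s[0].isdigit()` (False on empty)
def pvFirstDigit (s : String) : Bool :=
  match s.toList with
  | [] => false
  | c :: _ => PySem.Chars.isdigit c
-- s.split('\n') with the non-empty literal separator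
def pvSplitLines (s : String) : List String := (PySem.Str.split? s "\n").getD []

-- ===== PORT A =====
-- the for-loop with `started` flag, `continue` and `break`
def cleanLoopA : List String → List String → Bool → List String
  | [], cleanLines, _ => cleanLines
  | line :: rest, cleanLines, started =>
    let ll := pvNorm line
    if !started && pvSkipPats.any (fun p => PySem.Str.startswith ll p) then
      cleanLoopA rest cleanLines started          -- continue
    else
      let started1 :=
        if !started && (decide (ll ≠ "") && (pvFirstDigit ll || PySem.Str.startswith ll "q"))
        then true else started
      if started1 && pvStopPats.any (fun p => PySem.Str.startswith ll p) then
        cleanLines                                 -- break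
      else if started1 || pvFirstDigit ll then
        cleanLoopA rest (cleanLines ++ [line]) true
      else
        cleanLoopA rest cleanLines started1

def clean_llm_response (response : String) : String :=
  let response := PySem.Str.replace response "**" ""
  let response := PySem.Str.replace response "__" ""
  let lines := pvSplitLines (PySem.Str.strip response)
  let cleanLines := cleanLoopA lines [] false
  PySem.Str.strip (PySem.Str.join "\n" cleanLines)

-- ===== PORT B =====
-- `_starts_question(line)` of Source B
def pvStartsQuestion (line : String) : Bool :=
  let n := pvNorm line
  decide (n ≠ "") && (pvFirstDigit n || PySem.Str.startswith n "q")

-- the `for line in lines[start:]` collection loop with its break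
def cleanCollectB : List String → List String
  | [] => []
  | line :: rest =>
    if pvStopPats.any (fun p => PySem.Str.startswith (pvNorm line) p) then []
    else line :: cleanCollectB rest

def clean_llm_response_alt (response : String) : String :=
  let response := PySem.Str.replace (PySem.Str.replace response "**" "") "__" ""
  let lines := pvSplitLines (PySem.Str.strip response)
  match lines.findIdx? pvStartsQuestion with
  | none => ""
  | some start => PySem.Str.strip (PySem.Str.join "\n" (cleanCollectB (lines.drop start)))

-- ===== PRECONDITION & SPEC =====
def Spec_clean_llm_response (response : String) (out : String) : Prop := out = clean_llm_response_alt response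
instance (response : String) (out : String) : Decidable (Spec_clean_llm_response response out) := by unfold Spec_clean_llm_response; infer_instance

-- ===== CLAIM (what is proved, stated in full; the proofs are below) =====
def Claim_equal_clean_llm_response : Prop := ∀ (response : String), Dom_clean_llm_response response → Spec_clean_llm_response response (clean_llm_response response)

-- ===== LEMMAS AND PROOFS =====

-- a non-empty prefix fixes the head character
theorem head_of_startswith (s p : String) (c : Char)
    (hc : p.toList.head? = some c) (h : PySem.Str.startswith s p = true) :
    s.toList.head? = some c := by
  rw [PySem.Str.startswith_eq, PySem.Chars.startswith_iff] at h
  obtain ⟨t, ht⟩ := h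
  cases hp : p.toList with
  | nil => simp [hp] at hc
  | cons a l =>
    rw [hp] at hc ht
    simp at hc
    subst hc
    rw [← ht]
    rfl

-- a question-starting line matches no stop pattern
theorem starts_question_not_stop (l : String) (hq : pvStartsQuestion l = true) :
    pvStopPats.any (fun p => PySem.Str.startswith (pvNorm l) p) = false := by
  unfold pvStartsQuestion at hq
  simp only [Bool.and_eq_true, Bool.or_eq_true, decide_eq_true_eq] at hq
  obtain ⟨hne, hd⟩ := hq
  by_contra hcon
  rw [Bool.not_eq_false, List.any_eq_true] at hcon
  obtain ⟨p, hp, hsw⟩ := hcon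
  have hhead : ∀ c : Char, p.toList.head? = some c → (pvNorm l).toList.head? = some c :=
    fun c hc => head_of_startswith _ _ _ hc hsw
  fin_cases hp <;>
    (first
      | (have h1 := hhead _ rfl
         rcases hd with hd | hd
         · unfold pvFirstDigit at hd
           rcases hl : (pvNorm l).toList with _ | ⟨c, cs⟩
           · rw [hl] at h1; simp at h1
           · rw [hl] at h1 hd
             simp at h1
             subst h1
             simp [PySem.Chars.isdigit] at hd
             revert hd
             decide
         · have h2 := head_of_startswith _ "q" _ rfl hd
           rw [h1] at h2
           exact absurd h2 (by decide)))

-- a question-starting line matches no skip pattern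
theorem starts_question_not_skip (l : String) (hq : pvStartsQuestion l = true) :
    pvSkipPats.any (fun p => PySem.Str.startswith (pvNorm l) p) = false := by
  unfold pvStartsQuestion at hq
  simp only [Bool.and_eq_true, Bool.or_eq_true, decide_eq_true_eq] at hq
  obtain ⟨hne, hd⟩ := hq
  by_contra hcon
  rw [Bool.not_eq_false, List.any_eq_true] at hcon
  obtain ⟨p, hp, hsw⟩ := hcon
  have hhead : ∀ c : Char, p.toList.head? = some c → (pvNorm l).toList.head? = some c :=
    fun c hc => head_of_startswith _ _ _ hc hsw
  fin_cases hp <;>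
    (first
      | (have h1 := hhead _ rfl
         rcases hd with hd | hd
         · unfold pvFirstDigit at hd
           rcases hl : (pvNorm l).toList with _ | ⟨c, cs⟩
           · rw [hl] at h1; simp at h1
           · rw [hl] at h1 hd
             simp at h1
             subst h1
             simp [PySem.Chars.isdigit] at hd
             revert hd
             decide
         · have h2 := head_of_startswith _ "q" _ rfl hd
           rw [h1] at h2
           exact absurd h2 (by decide)))

-- once started, A's loop appends until a stop line, exactly B's collection loop
theorem loopA_started (lines : List String) : ∀ acc,
    cleanLoopA lines acc true = acc ++ cleanCollectB lines := by
  induction lines with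
  | nil => intro acc; simp [cleanLoopA, cleanCollectB]
  | cons line rest ih =>
    intro acc
    by_cases hs : (pvStopPats.any fun p => PySem.Str.startswith (pvNorm line) p) = true
    · simp at hs
      simp [cleanLoopA, cleanCollectB, hs]
    · have hne : ¬ ∃ x ∈ pvStopPats, PySem.Chars.startswith (pvNorm line).toList x.toList = true := by
        simpa using hs
      simp [cleanLoopA, cleanCollectB, hne, ih, List.append_assoc]

-- B's phase-1 search followed by phase-2 collection, as one recursion
def bScan : List String → List String
  | [] => []
  | l :: rest => if pvStartsQuestion l then cleanCollectB (l :: rest) else bScan rest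

-- before started, A's loop drops lines until the first question line
theorem loopA_not_started (lines : List String) : ∀ acc,
    cleanLoopA lines acc false = acc ++ bScan lines := by
  induction lines with
  | nil => intro acc; simp [cleanLoopA, bScan]
  | cons line rest ih =>
    intro acc
    by_cases hq : pvStartsQuestion line = true
    · have hskip := starts_question_not_skip line hq
      have hstop := starts_question_not_stop line hq
      have hq' : (decide (pvNorm line ≠ "") &&
          (pvFirstDigit (pvNorm line) || PySem.Str.startswith (pvNorm line) "q")) = true := by
        unfold pvStartsQuestion at hq; simpa using hq
      simp only [cleanLoopA, bScan, cleanCollectB, Bool.not_false, Bool.true_and,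
        hskip, hq', hstop, Bool.false_eq_true, if_false, if_true, Bool.true_or, hq,
        loopA_started]
      simp [List.append_assoc]
    · have hqf : pvStartsQuestion line = false := by simpa using hq
      have hq' : (decide (pvNorm line ≠ "") &&
          (pvFirstDigit (pvNorm line) || PySem.Str.startswith (pvNorm line) "q")) = false := by
        unfold pvStartsQuestion at hqf; simpa using hqf
      have hfd : pvFirstDigit (pvNorm line) = false := by
        rcases hb : pvFirstDigit (pvNorm line) with _ | _
        · rfl
        · exfalso
          have hne : decide (pvNorm line ≠ "") = true := by
            unfold pvFirstDigit at hb
            rcases hl : (pvNorm line).toList with _ | ⟨c, cs⟩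
            · rw [hl] at hb; simp at hb
            · simp only [decide_eq_true_eq]
              intro hcon
              rw [hcon] at hl
              simp at hl
          rw [hne, hb] at hq'
          simp at hq'
      rw [hfd, Bool.false_or] at hq'
      simp only [cleanLoopA, bScan, Bool.not_false, Bool.true_and, hq', hqf,
        Bool.false_eq_true, if_false, Bool.false_and, hfd, Bool.false_or, Bool.or_false,
        ite_self, ih]

-- B's findIdx?/drop phase computes bScan
theorem find_drop_eq_bScan (lines : List String) :
    (match lines.findIdx? pvStartsQuestion with
     | none => ("" : String)
     | some start => PySem.Str.strip (PySem.Str.join "\n" (cleanCollectB (lines.drop start))))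
    = PySem.Str.strip (PySem.Str.join "\n" (bScan lines)) := by
  induction lines with
  | nil => simp [bScan]; decide
  | cons l rest ih =>
    rw [List.findIdx?_cons]
    by_cases hq : pvStartsQuestion l = true
    · simp [hq, bScan]
    · simp only [Bool.not_eq_true] at hq
      rw [hq]
      simp only [if_false, bScan, hq, Bool.false_eq_true]
      rw [← ih]
      rcases h : rest.findIdx? pvStartsQuestion with _ | i
      · simp
      · simp

-- ===== VERDICT (by name: the statement is the Claim_ definition above) =====
theorem clean_llm_response_spec : Claim_equal_clean_llm_response := by
  intro response _
  unfold Spec_clean_llm_response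
  simp only [clean_llm_response, clean_llm_response_alt, loopA_not_started, List.nil_append]
  rw [← find_drop_eq_bScan]
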